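-- pv_equiv track=rewrite | github.com/justintomlinson/Pythonpdxcodeguild | code1/case.py | case_change_final
-- ===== SOURCE A (Python) =====
-- def case_change_final(split,new_format):
--     """This function converts an agnostic version of the user input word from case_change_intermediate to the user
--     requested case format.
--     >>> case_change_final('snake_case')
--
--     >>> case_change_final('CamelCase')
--
--     >>> case_change_final('kebab-case')
--
--     >>> case_change_final('CONSTANT_CASE')
--
--
--     :return:
--     """
--     case_change = ''
--
--     if new_format == 'camel':
--         case_change = ''.join([y.capitalize() for y in split])
--     elif new_format == 'snake':
--         case_change = '_'.join(split)
--     elif new_format =='kebab':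
--         case_change = '-'.join(split)
--     else:
--         case_change = '-'.join([y.upper() for y in split])
--
--     return(case_change)
-- ===== SOURCE B (Python) =====
-- def case_change_final(split, new_format):
--     """Single character-level pass: one flat loop builds the output char list,
--     using first-word/first-char flags instead of per-mode join statements."""
--     sep = '' if new_format == 'camel' else '_' if new_format == 'snake' else '-'
--     chars = []
--     first_word = True
--     for word in split:
--         if not first_word:
--             chars.append(sep)
--         first_word = False
--         first_char = True
--         for ch in word:
--             if new_format == 'camel':
--                 chars.append(ch.upper() if first_char else ch.lower())
--             elif new_format == 'snake' or new_format == 'kebab':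
--                 chars.append(ch)
--             else:
--                 chars.append(ch.upper())
--             first_char = False
--     return ''.join(chars)
-- ===== Notes on version B (the rewrite author's own statement) =====
-- stated objective: alternative
-- what changed: Replaced A's four per-mode join statements over whole-word lists by one flat character-level pass that appends one character at a time, deciding separator insertion and per-character casing with explicit first-word/first-char flags.
import Mathlib
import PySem

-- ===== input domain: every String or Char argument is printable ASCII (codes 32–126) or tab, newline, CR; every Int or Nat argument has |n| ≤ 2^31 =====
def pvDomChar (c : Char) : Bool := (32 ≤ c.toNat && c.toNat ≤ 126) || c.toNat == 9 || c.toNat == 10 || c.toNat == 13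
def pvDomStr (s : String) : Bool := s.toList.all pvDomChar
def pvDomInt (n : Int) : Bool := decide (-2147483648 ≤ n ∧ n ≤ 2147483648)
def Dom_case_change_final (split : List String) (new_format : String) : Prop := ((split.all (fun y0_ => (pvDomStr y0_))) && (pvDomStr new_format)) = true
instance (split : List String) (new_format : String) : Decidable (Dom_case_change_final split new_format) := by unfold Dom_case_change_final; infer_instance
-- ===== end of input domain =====

-- B replaces A's four join statements by one flat character-level pass with first-word/first-char flags (objective: alternative decomposition); return values proved equal.

-- ===== PORT A =====
-- str.capitalize (ASCII-exact): first char uppercased, the rest lowercased.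
def pvCapitalize (s : String) : String :=
  match s.toList with
  | [] => ""
  | c :: rest => String.ofList (PySem.Chars.upperChar c :: PySem.Chars.lower rest)

def case_change_final (split : List String) (new_format : String) : String :=
  if new_format == "camel" then PySem.Str.join "" (split.map (fun y => pvCapitalize y))
  else if new_format == "snake" then PySem.Str.join "_" split
  else if new_format == "kebab" then PySem.Str.join "-" split
  else PySem.Str.join "-" (split.map (fun y => PySem.Str.upper y))

-- ===== PORT B =====
-- inner loop of Source B: one character appended per step, first_char flag in the state
def pvStep (nf : String) (st : List Char × Bool) (ch : Char) : List Char × Bool :=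
  (st.1 ++ [if nf == "camel" then (if st.2 then PySem.Chars.upperChar ch else PySem.Chars.lowerChar ch)
            else if nf == "snake" || nf == "kebab" then ch
            else PySem.Chars.upperChar ch], false)

def pvWordLoop (nf : String) (acc : List Char) (w : String) : List Char :=
  (w.toList.foldl (pvStep nf) (acc, true)).1

def case_change_final_alt (split : List String) (new_format : String) : String :=
  let sep : List Char := if new_format == "camel" then [] else if new_format == "snake" then ['_'] else ['-']
  String.ofList ((split.foldl (fun (st : List Char × Bool) w =>
      (pvWordLoop new_format (if st.2 then st.1 else st.1 ++ sep) w, false)) ([], true)).1)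

-- ===== PRECONDITION & SPEC =====
def Spec_case_change_final (split : List String) (new_format : String) (out : String) : Prop := out = case_change_final_alt split new_format
instance (split : List String) (new_format : String) (out : String) : Decidable (Spec_case_change_final split new_format out) := by unfold Spec_case_change_final; infer_instance

-- ===== CLAIM (what is proved, stated in full; the proofs are below) =====
def Claim_equal_case_change_final : Prop := ∀ (split : List String) (new_format : String), Dom_case_change_final split new_format → Spec_case_change_final split new_format (case_change_final split new_format)

-- ===== LEMMAS AND PROOFS =====

-- the per-character transform Source B applies after the first character of a word
def pvRest (nf : String) (ch : Char) : Char :=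
  if nf == "camel" then PySem.Chars.lowerChar ch
  else if nf == "snake" || nf == "kebab" then ch
  else PySem.Chars.upperChar ch

-- the transform Source B applies to the first character of a word
def pvFirst (nf : String) (ch : Char) : Char :=
  if nf == "camel" then PySem.Chars.upperChar ch
  else if nf == "snake" || nf == "kebab" then ch
  else PySem.Chars.upperChar ch

-- the whole-word result of Source B's inner loop
def pvTw (nf : String) (w : String) : List Char :=
  match w.toList with
  | [] => []
  | c :: rest => pvFirst nf c :: rest.map (pvRest nf)

theorem pv_foldl_false (nf : String) (cs : List Char) (acc : List Char) :
    cs.foldl (pvStep nf) (acc, false) = (acc ++ cs.map (pvRest nf), false) := by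
  induction cs generalizing acc with
  | nil => simp
  | cons c rest ih =>
      simp only [List.foldl_cons, List.map_cons]
      rw [show pvStep nf (acc, false) c = (acc ++ [pvRest nf c], false) by
        simp [pvStep, pvRest]]
      rw [ih]; simp

theorem pv_wordLoop_eq (nf : String) (acc : List Char) (w : String) :
    pvWordLoop nf acc w = acc ++ pvTw nf w := by
  unfold pvWordLoop pvTw
  cases h : w.toList with
  | nil => simp
  | cons c rest =>
      simp only [List.foldl_cons]
      rw [show pvStep nf (acc, true) c = (acc ++ [pvFirst nf c], false) by
        simp [pvStep, pvFirst]]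
      rw [pv_foldl_false]; simp

theorem pv_outer_false (nf : String) (sep : List Char) (ws : List String) (acc : List Char) :
    ws.foldl (fun (st : List Char × Bool) w =>
        (pvWordLoop nf (if st.2 then st.1 else st.1 ++ sep) w, false)) (acc, false)
      = (acc ++ (ws.map (fun w => sep ++ pvTw nf w)).flatten, false) := by
  induction ws generalizing acc with
  | nil => simp
  | cons w rest ih =>
      simp only [List.foldl_cons, List.map_cons, List.flatten_cons]
      rw [show (if false = true then acc else acc ++ sep) = acc ++ sep by simp]
      rw [pv_wordLoop_eq, ih]; simp

theorem pv_join_eq (sep : List Char) (a : List Char) (rest : List (List Char)) :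
    PySem.Chars.join sep (a :: rest) = a ++ (rest.map (fun x => sep ++ x)).flatten := by
  induction rest generalizing a with
  | nil => simp [PySem.Chars.join_singleton]
  | cons b r ih =>
      rw [PySem.Chars.join_cons_cons, ih b]
      simp

theorem pv_alt_toList (split : List String) (nf : String) :
    (case_change_final_alt split nf).toList
      = PySem.Chars.join
          (if nf == "camel" then [] else if nf == "snake" then ['_'] else ['-'])
          (split.map (pvTw nf)) := by
  unfold case_change_final_alt
  cases split with
  | nil => simp [PySem.Chars.join, List.intercalate]
  | cons w rest =>
      simp only [List.foldl_cons, List.map_cons, if_true]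
      rw [pv_outer_false, pv_join_eq]
      simp [pv_wordLoop_eq, Function.comp_def]

theorem pv_tw_camel (w : String) : pvTw "camel" w = (pvCapitalize w).toList := by
  unfold pvTw pvCapitalize
  cases h : w.toList with
  | nil => simp
  | cons c rest => simp [pvFirst, pvRest, PySem.Chars.lower]

theorem pv_tw_id (nf : String) (e1 : (nf == "camel") = false)
    (hk : ((nf == "snake") || (nf == "kebab")) = true) (w : String) :
    pvTw nf w = w.toList := by
  unfold pvTw
  cases h : w.toList with
  | nil => simp
  | cons c rest =>
      have hr : List.map (pvRest nf) rest = rest := by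
        have h0 := List.map_congr_left (l := rest) (f := pvRest nf) (g := fun c => c)
          (fun c _ => by simp [pvRest, e1, hk])
        simpa using h0
      simp [pvFirst, e1, hk, hr]

theorem pv_tw_upper (nf : String) (h1 : nf ≠ "camel") (h2 : nf ≠ "snake") (h3 : nf ≠ "kebab")
    (w : String) : pvTw nf w = (PySem.Str.upper w).toList := by
  unfold pvTw
  cases h : w.toList with
  | nil => simp [PySem.Chars.upper, h]
  | cons c rest =>
      have e1 : (nf == "camel") = false := by simp [h1]
      have e2 : (nf == "snake") = false := by simp [h2]
      have e3 : (nf == "kebab") = false := by simp [h3]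
      simp [pvFirst, pvRest, e1, e2, e3, h, PySem.Chars.upper]

-- ===== VERDICT (by name: the statement is the Claim_ definition above) =====
theorem case_change_final_spec : Claim_equal_case_change_final := by
  intro split nf _
  unfold Spec_case_change_final
  apply String.toList_inj.mp
  rw [pv_alt_toList]
  unfold case_change_final
  by_cases h1 : nf = "camel"
  · subst h1
    have b : ("camel" == "camel") = true := by decide
    rw [if_pos b, if_pos b, PySem.Str.toList_join]
    have hm : split.map (pvTw "camel")
        = (split.map (fun y => pvCapitalize y)).map String.toList := by
      rw [List.map_map]
      exact List.map_congr_left (fun w _ => by simpa using pv_tw_camel w)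
    rw [hm]
    simp
  · by_cases h2 : nf = "snake"
    · subst h2
      rw [if_neg (by decide : ¬ (("snake" == "camel") = true)),
        if_neg (by decide : ¬ (("snake" == "camel") = true)),
        if_pos (by decide : (("snake" == "snake") = true)),
        if_pos (by decide : (("snake" == "snake") = true)),
        PySem.Str.toList_join]
      have hm : split.map (pvTw "snake") = split.map String.toList :=
        List.map_congr_left (fun w _ => pv_tw_id "snake" (by decide) (by decide) w)
      rw [hm]
      simp
    · by_cases h3 : nf = "kebab"
      · subst h3
        rw [if_neg (by decide : ¬ (("kebab" == "camel") = true)),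
          if_neg (by decide : ¬ (("kebab" == "camel") = true)),
          if_neg (by decide : ¬ (("kebab" == "snake") = true)),
          if_neg (by decide : ¬ (("kebab" == "snake") = true)),
          if_pos (by decide : (("kebab" == "kebab") = true)),
          PySem.Str.toList_join]
        have hm : split.map (pvTw "kebab") = split.map String.toList :=
          List.map_congr_left (fun w _ => pv_tw_id "kebab" (by decide) (by decide) w)
        rw [hm]
        simp
      · have ne1 : ¬ ((nf == "camel") = true) := by simp [h1]
        have ne2 : ¬ ((nf == "snake") = true) := by simp [h2]
        have ne3 : ¬ ((nf == "kebab") = true) := by simp [h3]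
        rw [if_neg ne1, if_neg ne1, if_neg ne2, if_neg ne2, if_neg ne3,
          PySem.Str.toList_join]
        have hm : split.map (pvTw nf)
            = (split.map (fun y => PySem.Str.upper y)).map String.toList := by
          rw [List.map_map]
          exact List.map_congr_left (fun w _ => by simpa using pv_tw_upper nf h1 h2 h3 w)
        rw [hm]
        simp
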